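-- pv_equiv track=rewrite | github.com/wuxmax/graphbrain-semsim-thesis | code/graphbrain_semsim/case_studies/pattern_making.py | make_any_fun_pattern
-- ===== SOURCE A (Python) =====
-- def make_any_fun_pattern(
--         words_and_vars: list[str],
--         inner_funcs: list[str] = None,
--         arg_roles: list[str] = None
-- ):
--     inner_patterns: list[str] = []
--     for wav in words_and_vars:
--         inner_patterns_ar: list[str] = []
--         if arg_roles:
--             for arg_role in arg_roles:
--                 inner_pattern_ar = f"{wav}/{arg_role}"
--                 inner_patterns_ar.append(inner_pattern_ar)
--         else:
--             inner_patterns_ar.append(wav)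
--
--         for inner_pattern in inner_patterns_ar:
--             if inner_funcs:
--                 for func in reversed(inner_funcs):
--                     inner_pattern = f"({func} {inner_pattern})"
--             inner_patterns.append(inner_pattern)
--
--     inner_patterns_joined = " ".join(inner_patterns)
--     return f"(any {inner_patterns_joined})"
-- ===== SOURCE B (Python) =====
-- def make_any_fun_pattern(
--         words_and_vars: list[str],
--         inner_funcs: list[str] = None,
--         arg_roles: list[str] = None
-- ):
--     funcs = inner_funcs or []
--     prefix = "".join(f"({func} " for func in funcs)
--     suffix = ")" * len(funcs)
--     patterns = []
--     for wav in words_and_vars: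
--         bases = [f"{wav}/{role}" for role in arg_roles] if arg_roles else [wav]
--         patterns.extend(prefix + base + suffix for base in bases)
--     return f"(any {' '.join(patterns)})"
-- ===== Notes on version B (the rewrite author's own statement) =====
-- stated objective: simpler
-- what changed: B precomputes the function-wrapping prefix '(f1 (f2 ... ' and suffix ')))' once and builds each pattern flatly as prefix+base+suffix, instead of A's per-pattern reversed nesting loop.
import Mathlib
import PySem

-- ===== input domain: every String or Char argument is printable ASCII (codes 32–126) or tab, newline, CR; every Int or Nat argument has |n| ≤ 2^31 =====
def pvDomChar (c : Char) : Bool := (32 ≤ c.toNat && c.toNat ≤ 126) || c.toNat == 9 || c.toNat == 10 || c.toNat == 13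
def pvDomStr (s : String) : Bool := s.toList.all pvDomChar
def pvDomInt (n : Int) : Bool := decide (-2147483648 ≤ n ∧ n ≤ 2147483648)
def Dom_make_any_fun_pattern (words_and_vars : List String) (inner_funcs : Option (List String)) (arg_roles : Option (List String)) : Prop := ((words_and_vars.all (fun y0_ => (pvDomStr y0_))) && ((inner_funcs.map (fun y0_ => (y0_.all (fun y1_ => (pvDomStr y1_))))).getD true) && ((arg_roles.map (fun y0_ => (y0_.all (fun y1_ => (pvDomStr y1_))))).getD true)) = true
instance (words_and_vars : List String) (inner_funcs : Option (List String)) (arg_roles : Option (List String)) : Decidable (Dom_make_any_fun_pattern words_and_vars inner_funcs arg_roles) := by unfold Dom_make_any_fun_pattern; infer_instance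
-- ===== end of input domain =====

-- B precomputes the function-wrapping prefix/suffix once and builds each pattern flatly
-- as prefix ++ base ++ suffix (objective: simpler), instead of A's per-pattern reversed nesting loop.


-- ===== PORT A =====
-- literal transliteration of A: per word, build the arg-role variants, then wrap each in
-- the inner functions by the reversed nesting loop, appending to the accumulator list.
def make_any_fun_pattern (words_and_vars : List String) (inner_funcs : Option (List String)) (arg_roles : Option (List String)) : String :=
  let funcs := inner_funcs.getD []
  let roles := arg_roles.getD []
  let inner_patterns : List String := words_and_vars.foldl (fun acc wav =>
    let inner_patterns_ar : List String :=
      if roles ≠ [] then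
        roles.foldl (fun bs arg_role => bs ++ [wav ++ "/" ++ arg_role]) []
      else [wav]
    inner_patterns_ar.foldl (fun acc2 inner_pattern =>
      acc2 ++ [if funcs ≠ [] then
                 funcs.reverse.foldl (fun p func => "(" ++ func ++ " " ++ p ++ ")") inner_pattern
               else inner_pattern]) acc) []
  "(any " ++ PySem.Str.join " " inner_patterns ++ ")"

-- ===== PORT B =====
-- literal transliteration of B: precomputed prefix/suffix, flat map over words and bases.
def make_any_fun_pattern_alt (words_and_vars : List String) (inner_funcs : Option (List String)) (arg_roles : Option (List String)) : String :=
  let funcs := inner_funcs.getD []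
  let pfx := PySem.Str.join "" (funcs.map (fun func => "(" ++ func ++ " "))
  let sfx := String.ofList (List.replicate funcs.length ')')
  let patterns : List String := words_and_vars.flatMap (fun wav =>
    (if (arg_roles.getD []) ≠ [] then (arg_roles.getD []).map (fun role => wav ++ "/" ++ role)
     else [wav]).map (fun base => pfx ++ base ++ sfx))
  "(any " ++ PySem.Str.join " " patterns ++ ")"

-- ===== PRECONDITION & SPEC =====
def Spec_make_any_fun_pattern (words_and_vars : List String) (inner_funcs : Option (List String)) (arg_roles : Option (List String)) (out : String) : Prop := out = make_any_fun_pattern_alt words_and_vars inner_funcs arg_roles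
instance (words_and_vars : List String) (inner_funcs : Option (List String)) (arg_roles : Option (List String)) (out : String) : Decidable (Spec_make_any_fun_pattern words_and_vars inner_funcs arg_roles out) := by unfold Spec_make_any_fun_pattern; infer_instance

-- ===== CLAIM (what is proved, stated in full; the proofs are below) =====
def Claim_equal_make_any_fun_pattern : Prop := ∀ (words_and_vars : List String) (inner_funcs : Option (List String)) (arg_roles : Option (List String)), Dom_make_any_fun_pattern words_and_vars inner_funcs arg_roles → Spec_make_any_fun_pattern words_and_vars inner_funcs arg_roles (make_any_fun_pattern words_and_vars inner_funcs arg_roles)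

-- ===== LEMMAS AND PROOFS =====

-- joining with the empty separator peels off the head string
theorem join_empty_cons (a : String) (l : List String) :
    PySem.Str.join "" (a :: l) = a ++ PySem.Str.join "" l := by
  cases l <;> simp [PySem.Str.join, PySem.Chars.join, List.intercalate, String.ofList_append]

theorem replicate_close_succ (n : Nat) :
    String.ofList (List.replicate (n + 1) ')') = String.ofList (List.replicate n ')') ++ ")" := by
  rw [List.replicate_succ']
  simp [String.ofList_append]

-- A's reversed nesting loop equals B's precomputed prefix/suffix around the base
theorem wrap_eq (funcs : List String) (p : String) :
    funcs.reverse.foldl (fun q func => "(" ++ func ++ " " ++ q ++ ")") p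
      = PySem.Str.join "" (funcs.map (fun func => "(" ++ func ++ " ")) ++ p
          ++ String.ofList (List.replicate funcs.length ')') := by
  induction funcs with
  | nil => simp [PySem.Str.join, PySem.Chars.join, List.intercalate]
  | cons f fs ih =>
      simp only [List.reverse_cons, List.foldl_append, List.foldl_cons, List.foldl_nil, ih,
        List.map_cons, join_empty_cons, List.length_cons, replicate_close_succ]
      simp [String.append_assoc]

-- the branched wrap of A, including the empty-funcs branch
theorem wrapped_eq (funcs : List String) (p : String) :
    (if funcs ≠ [] then
        funcs.reverse.foldl (fun q func => "(" ++ func ++ " " ++ q ++ ")") p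
      else p)
      = PySem.Str.join "" (funcs.map (fun func => "(" ++ func ++ " ")) ++ p
          ++ String.ofList (List.replicate funcs.length ')') := by
  split
  · exact wrap_eq funcs p
  · rename_i h
    simp only [ne_eq, not_not] at h
    subst h
    simp [PySem.Str.join, PySem.Chars.join, List.intercalate]

-- ===== VERDICT (by name: the statement is the Claim_ definition above) =====
theorem make_any_fun_pattern_spec : Claim_equal_make_any_fun_pattern := by
  intro words_and_vars inner_funcs arg_roles _
  unfold Spec_make_any_fun_pattern make_any_fun_pattern make_any_fun_pattern_alt
  simp only [PySem.List.foldl_append_singleton_eq_map, wrapped_eq,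
    PySem.List.foldl_append_eq_flatMap, List.nil_append]
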